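-- pv_equiv track=rewrite | github.com/jack-zj-liu/advent-of-code-2024 | 17b_chronospatial_computer.py | prog
-- ===== SOURCE A (Python) =====
-- program = [2,4,1,7,7,5,0,3,1,7,4,1,5,5,3,0]
--
-- def prog(a, b, c):
--     def getcombo(op):
--         if 0 <= op <= 3:
--             return op
--         if op == 4:
--             return a
--         if op == 5:
--             return b
--         if op == 6:
--             return c
--
--     outputs = []
--     i = 0
--     while i < len(program):
--         p = program[i]
--         op = program[i+1]
--         combo = getcombo(op)
--
--         if p == 0:
--             a = a // 2**combo
--             i += 2
--         elif p == 1: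
--             b = b ^ op
--             i += 2
--         elif p == 2:
--             b = combo%8
--             i += 2
--         elif p == 3:
--             if a != 0:
--                 i = op
--             else:
--                 i += 2
--         elif p == 4:
--             b = b ^ c
--             i += 2
--         elif p == 5:
--             outputs.append(combo%8)
--             i += 2
--         elif p == 6:
--             b = a // 2**combo
--             i += 2
--         elif p == 7:
--             c = a // 2**combo
--             i += 2
--
--     return outputs
-- ===== SOURCE B (Python) =====
-- def prog(a, b, c):
--     # direct arithmetic decoding of the fixed program: one base-8 digit of a per pass
--     out = [((a % 8) ^ (a >> ((a % 8) ^ 7))) % 8]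
--     return out if a // 8 == 0 else out + prog(a // 8, b, c)
-- ===== Notes on version B (the rewrite author's own statement) =====
-- stated objective: simpler
-- what changed: B replaces the opcode-dispatch interpreter over the fixed 16-entry program by a direct per-base-8-digit arithmetic loop computing ((a%8) ^ (a >> ((a%8)^7))) %8 each pass.
import Mathlib
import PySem

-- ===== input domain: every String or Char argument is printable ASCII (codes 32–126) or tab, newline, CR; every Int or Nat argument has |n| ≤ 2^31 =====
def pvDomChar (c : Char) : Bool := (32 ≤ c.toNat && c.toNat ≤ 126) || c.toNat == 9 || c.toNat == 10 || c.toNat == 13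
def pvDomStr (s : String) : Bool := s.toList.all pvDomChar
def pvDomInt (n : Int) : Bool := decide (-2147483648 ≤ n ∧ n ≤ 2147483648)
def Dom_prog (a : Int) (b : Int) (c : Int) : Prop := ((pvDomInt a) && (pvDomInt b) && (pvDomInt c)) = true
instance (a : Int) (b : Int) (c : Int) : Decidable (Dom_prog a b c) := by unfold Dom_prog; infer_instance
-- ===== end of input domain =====

-- B replaces A's opcode-dispatch interpreter by a direct per-base-8-digit arithmetic loop (objective: simpler).

-- ===== PORT A =====
-- the fixed global program
def programL : List Int := [2, 4, 1, 7, 7, 5, 0, 3, 1, 7, 4, 1, 5, 5, 3, 0]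

-- getcombo reads the current a, b, c (Python closure), so they are passed in;
-- Python returns None for op = 7 — that value is never USED by A on this program
def getcombo (a b c op : Int) : Option Int :=
  if 0 ≤ op ∧ op ≤ 3 then some op
  else if op = 4 then some a
  else if op = 5 then some b
  else if op = 6 then some c
  else none

-- the while loop; fuel only makes the recursion total (A diverges for a < 0, excluded by Pre_).
-- `.getD 0` discharges the Option of pyGet?/getcombo: both `none` cases are unreachable
-- for the indices/opcodes this fixed program produces; `combo.toNat` in `2 ^ combo.toNat`
-- is exact because combo is ≥ 0 whenever a branch uses it.
def progGo : Nat → Int → Int → Int → Int → List Int → List Int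
  | 0, _, _, _, _, outputs => outputs
  | fuel+1, i, a, b, c, outputs =>
    if i < 16 then
      let p := (PySem.List.pyGet? programL i).getD 0
      let op := (PySem.List.pyGet? programL (i+1)).getD 0
      let combo := (getcombo a b c op).getD 0
      if p = 0 then progGo fuel (i+2) (PySem.Int.floordiv a (2 ^ combo.toNat)) b c outputs
      else if p = 1 then progGo fuel (i+2) a (PySem.Int.bxor b op) c outputs
      else if p = 2 then progGo fuel (i+2) a (PySem.Int.mod combo 8) c outputs
      else if p = 3 then
        (if a ≠ 0 then progGo fuel op a b c outputs else progGo fuel (i+2) a b c outputs)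
      else if p = 4 then progGo fuel (i+2) a (PySem.Int.bxor b c) c outputs
      else if p = 5 then progGo fuel (i+2) a b c (outputs ++ [PySem.Int.mod combo 8])
      else if p = 6 then progGo fuel (i+2) a (PySem.Int.floordiv a (2 ^ combo.toNat)) c outputs
      else if p = 7 then progGo fuel (i+2) a b (PySem.Int.floordiv a (2 ^ combo.toNat)) outputs
      else progGo fuel i a b c outputs
    else outputs

def prog (a : Int) (b : Int) (c : Int) : List Int :=
  progGo (8 * (a.toNat + 1) + 9) 0 a b c []

-- ===== PORT B =====
-- one base-8 digit of a per recursive call (Source B's recursion; a ≥ 0 on Pre_)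
def altGo (a : Nat) : List Int :=
  let out : List Int := [(((a % 8) ^^^ (a >>> ((a % 8) ^^^ 7))) % 8 : Nat)]
  if a / 8 = 0 then out
  else out ++ altGo (a / 8)
termination_by a
decreasing_by exact Nat.div_lt_self (Nat.pos_of_ne_zero (by rintro rfl; simp_all)) (by omega)

def prog_alt (a : Int) (_b : Int) (_c : Int) : List Int := altGo a.toNat

-- ===== PRECONDITION & SPEC =====
-- A (and Source B) never returns for a < 0: the loop keeps a = a // 8 at -1 forever
def Pre_prog (a : Int) (_b : Int) (_c : Int) : Prop := 0 ≤ a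
instance (a : Int) (b : Int) (c : Int) : Decidable (Pre_prog a b c) := by unfold Pre_prog; infer_instance
def pvWitness_prog : Int × Int × Int := (117440, 0, 0)

def Spec_prog (a : Int) (b : Int) (c : Int) (out : List Int) : Prop := out = prog_alt a b c
instance (a : Int) (b : Int) (c : Int) (out : List Int) : Decidable (Spec_prog a b c out) := by unfold Spec_prog; infer_instance

-- ===== CLAIM (what is proved, stated in full; the proofs are below) =====
def Claim_equal_prog : Prop := ∀ (a : Int) (b : Int) (c : Int), Dom_prog a b c → Pre_prog a b c → Spec_prog a b c (prog a b c)

-- ===== LEMMAS AND PROOFS =====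

theorem step0 (f : Nat) (a b c : Int) (outs : List Int) :
    progGo (f+1) 0 a b c outs = progGo f 2 a (PySem.Int.mod a 8) c outs := by
  simp [progGo, programL, getcombo, PySem.List.pyGet?, PySem.List.pyIdx?]
theorem step2 (f : Nat) (a b c : Int) (outs : List Int) :
    progGo (f+1) 2 a b c outs = progGo f 4 a (PySem.Int.bxor b 7) c outs := by
  simp [progGo, programL, PySem.List.pyGet?, PySem.List.pyIdx?]
theorem step4 (f : Nat) (a b c : Int) (outs : List Int) :
    progGo (f+1) 4 a b c outs = progGo f 6 a b (PySem.Int.floordiv a (2 ^ b.toNat)) outs := by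
  simp [progGo, programL, getcombo, PySem.List.pyGet?, PySem.List.pyIdx?]
theorem step6 (f : Nat) (a b c : Int) (outs : List Int) :
    progGo (f+1) 6 a b c outs = progGo f 8 (PySem.Int.floordiv a 8) b c outs := by
  simp [progGo, programL, getcombo, PySem.List.pyGet?, PySem.List.pyIdx?]
theorem step8 (f : Nat) (a b c : Int) (outs : List Int) :
    progGo (f+1) 8 a b c outs = progGo f 10 a (PySem.Int.bxor b 7) c outs := by
  simp [progGo, programL, PySem.List.pyGet?, PySem.List.pyIdx?]
theorem step10 (f : Nat) (a b c : Int) (outs : List Int) :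
    progGo (f+1) 10 a b c outs = progGo f 12 a (PySem.Int.bxor b c) c outs := by
  simp [progGo, programL, PySem.List.pyGet?, PySem.List.pyIdx?]
theorem step12 (f : Nat) (a b c : Int) (outs : List Int) :
    progGo (f+1) 12 a b c outs = progGo f 14 a b c (outs ++ [PySem.Int.mod b 8]) := by
  simp [progGo, programL, getcombo, PySem.List.pyGet?, PySem.List.pyIdx?]
theorem step14 (f : Nat) (a b c : Int) (outs : List Int) :
    progGo (f+1) 14 a b c outs =
      if a = 0 then progGo f 16 a b c outs else progGo f 0 a b c outs := by
  by_cases h : a = 0 <;> simp [progGo, programL, PySem.List.pyGet?, PySem.List.pyIdx?, h]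
theorem step16 (f : Nat) (a b c : Int) (outs : List Int) :
    progGo (f+1) 16 a b c outs = outs := by
  simp [progGo]

theorem cast_mod8 (m : Nat) : PySem.Int.mod ((m : Nat) : Int) 8 = ((m % 8 : Nat) : Int) := by
  exact_mod_cast PySem.Int.mod_natCast m 8

theorem cast_xor7 (m : Nat) : PySem.Int.bxor ((m : Nat) : Int) 7 = ((m ^^^ 7 : Nat) : Int) := by
  exact_mod_cast PySem.Int.bxor_natCast m 7

theorem cast_fdiv8 (m : Nat) : PySem.Int.floordiv ((m : Nat) : Int) 8 = ((m / 8 : Nat) : Int) := by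
  exact_mod_cast PySem.Int.floordiv_natCast m 8

theorem cast_fdiv_pow (m e : Nat) :
    PySem.Int.floordiv ((m : Nat) : Int) (2 ^ (((e : Nat) : Int)).toNat) = ((m / 2 ^ e : Nat) : Int) := by
  have h2 : (2 : Int) ^ (((e : Nat) : Int)).toNat = (((2 ^ e : Nat)) : Int) := by
    simp
  rw [h2]
  exact_mod_cast PySem.Int.floordiv_natCast m (2 ^ e)



-- one full pass of the interpreter over the 8 instructions, from i = 0
theorem pass_step (f : Nat) (n : Nat) (b c : Int) (outs : List Int) :
    progGo (f + 9) 0 (n : Int) b c outs =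
      if n / 8 = 0 then outs ++ altGo n
      else progGo (f + 1) 0 ((n / 8 : Nat) : Int) (((n % 8) ^^^ n / 2 ^ ((n % 8) ^^^ 7) : Nat) : Int)
             ((n / 2 ^ (n % 8 ^^^ 7) : Nat) : Int)
             (outs ++ [((((n % 8) ^^^ (n >>> ((n % 8) ^^^ 7))) % 8 : Nat) : Int)]) := by
  rw [show f + 9 = (f+8)+1 from rfl, step0, cast_mod8,
      show f + 8 = (f+7)+1 from rfl, step2, cast_xor7,
      show f + 7 = (f+6)+1 from rfl, step4, cast_fdiv_pow,
      show f + 6 = (f+5)+1 from rfl, step6, cast_fdiv8,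
      show f + 5 = (f+4)+1 from rfl, step8, cast_xor7, Nat.xor_xor_cancel_right,
      show f + 4 = (f+3)+1 from rfl, step10, PySem.Int.bxor_natCast,
      show f + 3 = (f+2)+1 from rfl, step12, cast_mod8,
      show f + 2 = (f+1)+1 from rfl, step14]
  by_cases h : n / 8 = 0
  · simp only [h, Nat.cast_zero]
    rw [show f + 1 = f+1 from rfl, step16]
    conv_rhs => rw [altGo]
    simp [h, Nat.shiftRight_eq_div_pow]
  · have hne : ((n / 8 : Nat) : Int) ≠ 0 := by exact_mod_cast h
    simp only [h, if_neg hne, if_false, Nat.shiftRight_eq_div_pow]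

theorem loop_eq (k : Nat) : ∀ (n : Nat), n < 8 ^ k → ∀ (b c : Int) (outs : List Int),
    progGo (8 * k + 9) 0 (n : Int) b c outs = outs ++ altGo n := by
  induction k with
  | zero =>
    intro n hn b c outs
    have hn0 : n = 0 := by omega
    subst hn0
    rw [show 8 * 0 + 9 = 0 + 9 from rfl, pass_step]
    simp
  | succ k ih =>
    intro n hn b c outs
    rw [show 8 * (k+1) + 9 = (8*k+8) + 9 from rfl, pass_step]
    by_cases h : n / 8 = 0
    · simp [h]
    · simp only [h, if_false]
      rw [show (8*k+8) + 1 = 8*k + 9 from rfl,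
          ih (n / 8) (Nat.div_lt_iff_lt_mul (by omega) |>.mpr (by rw [← pow_succ]; exact hn))]
      conv_rhs => rw [altGo]
      simp [h, Nat.shiftRight_eq_div_pow]

-- ===== VERDICT (by name: the statement is the Claim_ definition above) =====
theorem prog_spec : Claim_equal_prog := by
  intro a b c _ hpre
  unfold Spec_prog prog prog_alt
  obtain ⟨n, rfl⟩ := Int.eq_ofNat_of_zero_le hpre
  have h1 : (8 * ((n:Int).toNat + 1) + 9) = 8 * (n + 1) + 9 := by simp
  rw [h1, loop_eq (n + 1) n (by
    calc n < 2 ^ n := Nat.lt_two_pow_self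
    _ ≤ 8 ^ n := Nat.pow_le_pow_left (by omega) n
    _ < 8 ^ (n+1) := Nat.pow_lt_pow_succ (by omega))]
  simp
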